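-- pv_equiv track=rewrite | github.com/PHDuck1/MaklaiTest | paraphrase.py | is_divided
-- ===== SOURCE A (Python) =====
-- from typing import Generator, List, Tuple, Dict
--
-- def is_divided(labels: List[str]) -> bool:
--     """Check if NP's in the node is divided by CC or ','"""
--     previous_label = None
--
--     for label in labels:
--         if label == 'NP' and previous_label == 'NP':
--             return False
--
--         elif label in ('CC', ',') and previous_label in ('CC', ','):
--             return False
--
--         previous_label = label
--     return True
-- ===== SOURCE B (Python) =====
-- def is_divided(labels):
--     """Check if NP's in the node is divided by CC or ','"""
--     s = ''.join('N' if l == 'NP' else 'S' if l in ('CC', ',') else '.' for l in labels)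
--     return 'NN' not in s and 'SS' not in s
-- ===== Notes on version B (the rewrite author's own statement) =====
-- stated objective: alternative
-- what changed: B encodes the label list into a character string (NP->'N', CC/','->'S', other->'.') and decides the answer by substring search for the forbidden patterns 'NN' and 'SS', instead of A's stateful loop tracking previous_label.
import Mathlib
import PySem

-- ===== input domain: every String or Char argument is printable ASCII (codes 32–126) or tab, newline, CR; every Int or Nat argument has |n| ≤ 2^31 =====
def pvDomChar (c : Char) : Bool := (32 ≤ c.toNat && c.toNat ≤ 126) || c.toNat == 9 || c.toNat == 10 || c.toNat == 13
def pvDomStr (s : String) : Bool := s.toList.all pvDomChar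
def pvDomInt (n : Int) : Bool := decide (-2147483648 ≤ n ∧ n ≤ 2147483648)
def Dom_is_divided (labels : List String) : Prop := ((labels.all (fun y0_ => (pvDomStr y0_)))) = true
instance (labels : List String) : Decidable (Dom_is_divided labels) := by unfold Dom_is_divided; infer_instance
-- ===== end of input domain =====

-- B encodes labels as a character string (NP->'N', CC/','->'S', else '.') and searches it for the
-- forbidden substrings "NN" and "SS", instead of A's stateful loop; objective: alternative algorithm.


-- ===== PORT A =====
-- A's for-loop with early return, carrying previous_label : Option String (initially None)
def isDividedLoopA : Option String → List String → Bool
  | _, [] => true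
  | prev, l :: rest =>
    if l == "NP" && prev == some "NP" then false
    else if (l == "CC" || l == ",") && (prev == some "CC" || prev == some ",") then false
    else isDividedLoopA (some l) rest

def is_divided (labels : List String) : Bool := isDividedLoopA none labels

-- ===== PORT B =====
-- the per-label character of B's join: 'N' if l == 'NP' else 'S' if l in ('CC', ',') else '.'
def encB (l : String) : Char :=
  if l == "NP" then 'N' else if l == "CC" || l == "," then 'S' else '.'

-- s = ''.join(...); return 'NN' not in s and 'SS' not in s   ('sub in s' = PySem.Chars.isIn)
def is_divided_alt (labels : List String) : Bool :=
  let s := labels.map encB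
  !(PySem.Chars.isIn ['N', 'N'] s) && !(PySem.Chars.isIn ['S', 'S'] s)

-- ===== PRECONDITION & SPEC =====
def Spec_is_divided (labels : List String) (out : Bool) : Prop := out = is_divided_alt labels
instance (labels : List String) (out : Bool) : Decidable (Spec_is_divided labels out) := by unfold Spec_is_divided; infer_instance

-- ===== CLAIM (what is proved, stated in full; the proofs are below) =====
def Claim_equal_is_divided : Prop := ∀ (labels : List String), Dom_is_divided labels → Spec_is_divided labels (is_divided labels)

-- ===== LEMMAS AND PROOFS =====

-- proof-side recursive form: A's loop after encoding, seeded with the previous char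
def pairScan : Char → List Char → Bool
  | _, [] => true
  | p, c :: rest =>
    if (c = 'N' ∧ p = 'N') ∨ (c = 'S' ∧ p = 'S') then false else pairScan c rest

theorem encB_N (l : String) : encB l = 'N' ↔ l = "NP" := by
  simp only [encB]; split_ifs with h1 h2 <;> simp_all
theorem encB_S (l : String) : encB l = 'S' ↔ (l = "CC" ∨ l = ",") := by
  simp only [encB]; split_ifs with h1 h2 <;> simp_all

-- A's loop equals pairScan on the encoded characters
theorem loopA_eq_pairScan (rest : List String) : ∀ prev : String,
    isDividedLoopA (some prev) rest = pairScan (encB prev) (rest.map encB) := by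
  induction rest with
  | nil => intro _; rfl
  | cons l rest ih =>
    intro prev
    simp only [isDividedLoopA, List.map, pairScan]
    have hcond : ((encB l = 'N' ∧ encB prev = 'N') ∨ (encB l = 'S' ∧ encB prev = 'S')) ↔
        ((l = "NP" ∧ prev = "NP") ∨ ((l = "CC" ∨ l = ",") ∧ (prev = "CC" ∨ prev = ","))) := by
      rw [encB_N, encB_N, encB_S, encB_S]
    by_cases hb : ((l = "NP" ∧ prev = "NP") ∨ ((l = "CC" ∨ l = ",") ∧ (prev = "CC" ∨ prev = ",")))
    · rw [if_pos (hcond.mpr hb)]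
      rcases hb with ⟨h1, h2⟩ | ⟨h1, h2⟩ <;> simp [h1, h2]
    · rw [if_neg (fun h => hb (hcond.mp h))]
      rcases not_or.mp hb with ⟨h1, h2⟩
      rw [if_neg (by simp_all), if_neg (by simp_all)]
      exact ih l

-- [a,a] is an infix of p :: cs iff it starts right at p or occurs in cs
theorem pair_infix_cons (a p : Char) (cs : List Char) :
    [a, a] <:+: (p :: cs) ↔ (p = a ∧ ∃ cs', cs = a :: cs') ∨ [a, a] <:+: cs := by
  rw [List.infix_cons_iff]
  constructor
  · rintro (h | h)
    · left
      cases cs with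
      | nil => exact absurd h.length_le (by simp)
      | cons y cs' =>
        rcases List.cons_prefix_cons.mp h with ⟨rfl, h2⟩
        rcases List.cons_prefix_cons.mp h2 with ⟨rfl, _⟩
        exact ⟨rfl, cs', rfl⟩
    · right; exact h
  · rintro (⟨rfl, cs', rfl⟩ | h)
    · left; exact List.cons_prefix_cons.mpr ⟨rfl, List.cons_prefix_cons.mpr ⟨rfl, List.nil_prefix⟩⟩
    · right; exact h

-- pairScan p cs decides "no NN and no SS infix of p :: cs"
theorem pairScan_iff (cs : List Char) : ∀ p : Char,
    pairScan p cs = true ↔ (¬ [('N' : Char), 'N'] <:+: (p :: cs) ∧ ¬ [('S' : Char), 'S'] <:+: (p :: cs)) := by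
  induction cs with
  | nil =>
    intro p
    simp only [pairScan, true_iff]
    constructor <;> exact fun h => absurd h.length_le (by simp)
  | cons c rest ih =>
    intro p
    rw [pair_infix_cons, pair_infix_cons 'S' p (c :: rest),
        pair_infix_cons 'N' c rest, pair_infix_cons 'S' c rest]
    simp only [pairScan]
    by_cases hb : ((c = 'N' ∧ p = 'N') ∨ (c = 'S' ∧ p = 'S'))
    · rw [if_pos hb]
      rcases hb with ⟨rfl, rfl⟩ | ⟨rfl, rfl⟩ <;> simp
    · rw [if_neg hb]
      rcases not_or.mp hb with ⟨h1, h2⟩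
      rw [ih c, pair_infix_cons 'N' c rest, pair_infix_cons 'S' c rest]
      simp only [List.cons.injEq]
      constructor
      · rintro ⟨hN, hS⟩
        refine ⟨fun h => ?_, fun h => ?_⟩
        · rcases h with ⟨hp, _, hc, _⟩ | h
          · exact h1 ⟨hc, hp⟩
          · exact hN h
        · rcases h with ⟨hp, _, hc, _⟩ | h
          · exact h2 ⟨hc, hp⟩
          · exact hS h
      · rintro ⟨hN, hS⟩
        exact ⟨fun h => hN (Or.inr h), fun h => hS (Or.inr h)⟩

-- ===== VERDICT (by name: the statement is the Claim_ definition above) =====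
theorem is_divided_spec : Claim_equal_is_divided := by
  intro labels _
  show is_divided labels = is_divided_alt labels
  cases labels with
  | nil =>
    simp only [is_divided, isDividedLoopA, is_divided_alt, List.map]
    decide
  | cons l rest =>
    have hA : is_divided (l :: rest) = pairScan (encB l) (rest.map encB) := by
      simp only [is_divided, isDividedLoopA]
      rw [if_neg (by simp), if_neg (by simp)]
      exact loopA_eq_pairScan rest l
    rw [hA]
    simp only [is_divided_alt, List.map]
    cases hscan : pairScan (encB l) (rest.map encB) with
    | true =>
      rcases (pairScan_iff (rest.map encB) (encB l)).mp hscan with ⟨hN, hS⟩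
      rw [(PySem.Chars.isIn_eq_false_iff _ _).mpr hN, (PySem.Chars.isIn_eq_false_iff _ _).mpr hS]
      rfl
    | false =>
      have h : ¬(¬ [('N' : Char), 'N'] <:+: (encB l :: rest.map encB) ∧
          ¬ [('S' : Char), 'S'] <:+: (encB l :: rest.map encB)) := fun h' => by
        rw [(pairScan_iff (rest.map encB) (encB l)).mpr h'] at hscan
        simp at hscan
      by_cases hN : [('N' : Char), 'N'] <:+: (encB l :: rest.map encB)
      · rw [(PySem.Chars.isIn_iff_infix _ _).mpr hN]; rfl
      · have hS : [('S' : Char), 'S'] <:+: (encB l :: rest.map encB) := by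
          by_contra hS
          exact h ⟨hN, hS⟩
        rw [(PySem.Chars.isIn_iff_infix _ _).mpr hS]
        simp
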